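-- pv_equiv track=rewrite | github.com/JerryZhuzq/leetcode | Geeksforgeek/divBinary.py | countWays
-- ===== SOURCE A (Python) =====
-- def countWays(arr, n):
--     pos = [0 for i in range(n)]
--     p = 0
--
--     # for loop for saving the positions
--     # of all 1s
--     for i in range(n):
--         if (arr[i] == 1):
--             pos[p] = i + 1
--             p += 1
--
--     # If array contains only 0s
--     if (p == 0):
--         return 0
--
--     ways = 1
--     for i in range(p - 1):
--         ways *= pos[i + 1] - pos[i]
--
--         # Return the total ways
--     return ways
-- ===== SOURCE B (Python) =====
-- def countWays(arr, n):
--     # Dynamic programming: dp[i] = number of ways to partition arr[:i] into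
--     # contiguous blocks each containing exactly one 1; answer is dp[n].
--     if n <= 0 or 1 not in arr[:n]:
--         return 0
--     dp = [1]
--     for i in range(1, n + 1):
--         ones = arr[:i].count(1)
--         total = 0
--         for j in range(1, i + 1):
--             # here ones == number of 1s in arr[j-1:i]
--             if ones == 1:
--                 total += dp[j - 1]
--             if arr[j - 1] == 1:
--                 ones -= 1
--         dp.append(total)
--     return dp[n]
-- ===== Notes on version B (the rewrite author's own statement) =====
-- stated objective: alternative
-- what changed: Replaces A's product-of-gaps-between-consecutive-1s computation by a dynamic program: dp[i] = number of ways to partition arr[:i] into blocks with exactly one 1 each, computed by summing dp[j-1] over segment starts j whose segment arr[j-1:i] contains exactly one 1; the answer is dp[n].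
import Mathlib
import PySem

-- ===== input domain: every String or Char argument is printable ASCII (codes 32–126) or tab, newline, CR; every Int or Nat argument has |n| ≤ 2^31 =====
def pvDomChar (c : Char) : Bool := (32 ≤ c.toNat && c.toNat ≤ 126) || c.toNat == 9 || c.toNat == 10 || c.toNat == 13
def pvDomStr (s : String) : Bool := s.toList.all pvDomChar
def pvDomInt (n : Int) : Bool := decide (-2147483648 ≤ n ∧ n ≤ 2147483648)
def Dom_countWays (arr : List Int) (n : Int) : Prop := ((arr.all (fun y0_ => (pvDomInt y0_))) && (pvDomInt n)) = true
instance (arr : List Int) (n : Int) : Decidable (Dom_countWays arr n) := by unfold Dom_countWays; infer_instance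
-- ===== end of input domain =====

-- B replaces A's product of gaps between consecutive 1s by a dynamic program over prefixes
-- (dp[i] = number of valid partitions of arr[:i]) — objective: a genuinely different algorithm.

-- ===== PORT A =====
def countWays (arr : List Int) (n : Int) : Int :=
  let pos0 : List Int := (PySem.List.pyRange 0 n 1).map (fun _ => 0)
  let st : List Int × Int :=
    (PySem.List.pyRange 0 n 1).foldl
      (fun st i =>
        if PySem.List.pyGetD arr i 0 = 1 then
          (PySem.List.pySetD st.1 st.2 (i + 1), st.2 + 1)
        else st)
      (pos0, 0)
  if st.2 = 0 then 0
  else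
    (PySem.List.pyRange 0 (st.2 - 1) 1).foldl
      (fun ways i =>
        ways * (PySem.List.pyGetD st.1 (i + 1) 0 - PySem.List.pyGetD st.1 i 0))
      1

-- ===== PORT B =====
def countWays_alt (arr : List Int) (n : Int) : Int :=
  if n ≤ 0 ∨ (1 : Int) ∉ PySem.List.slice arr none (some n) then 0
  else
    let dp : List Int :=
      (PySem.List.pyRange 1 (n + 1) 1).foldl
        (fun dp i =>
          let st : Int × Int :=
            (PySem.List.pyRange 1 (i + 1) 1).foldl
              (fun st j =>
                (if PySem.List.pyGetD arr (j - 1) 0 = 1 then st.1 - 1 else st.1,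
                 if st.1 = 1 then st.2 + PySem.List.pyGetD dp (j - 1) 0 else st.2))
              (((PySem.List.count (PySem.List.slice arr none (some i)) 1 : Nat) : Int), 0)
          dp ++ [st.2])
        [1]
    PySem.List.pyGetD dp n 0

-- ===== PRECONDITION & SPEC =====
-- Pre_ excludes exactly the inputs where Python A raises IndexError (arr[i] for i < n beyond
-- the end of arr); negative n is fine (both loops are empty and A returns 0).
def Pre_countWays (arr : List Int) (n : Int) : Prop := n ≤ (arr.length : Int)
instance (arr : List Int) (n : Int) : Decidable (Pre_countWays arr n) := by
  unfold Pre_countWays; infer_instance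
def pvWitness_countWays : List Int × Int := ([1, 0, 0, 1, 1], 5)

def Spec_countWays (arr : List Int) (n : Int) (out : Int) : Prop := out = countWays_alt arr n
instance (arr : List Int) (n : Int) (out : Int) : Decidable (Spec_countWays arr n out) := by
  unfold Spec_countWays; infer_instance

-- ===== CLAIM (what is proved, stated in full; the proofs are below) =====
def Claim_equal_countWays : Prop := ∀ (arr : List Int) (n : Int),
  Dom_countWays arr n → Pre_countWays arr n → Spec_countWays arr n (countWays arr n)

-- ===== LEMMAS AND PROOFS =====

-- product of gaps between consecutive elements (common characterisation of both results)
def prodGaps : List Int → Int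
  | [] => 1
  | [_] => 1
  | a :: b :: t => (b - a) * prodGaps (b :: t)

-- "arr[t] == 1" test, positions of 1s in arr[:i], count of 1s in arr[a:i]
def bP (arr : List Int) (t : Int) : Bool := decide (PySem.List.pyGetD arr t 0 = 1)
def onesF (arr : List Int) (i : Int) : List Int := (PySem.List.pyRange 0 i 1).filter (bP arr)
def cntF (arr : List Int) (a i : Int) : Int := (((PySem.List.pyRange a i 1).filter (bP arr)).length : Int)
-- value of B's dp[i]
def fDP (arr : List Int) (i : Int) : Int :=
  if onesF arr i = [] then (if i = 0 then 1 else 0) else prodGaps (onesF arr i)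

-- ---------- A-side lemmas ----------

-- sequential writes pos[k], pos[k+1], … (A's first loop writes into the pre-sized pos array)
def writeSeq (pos : List Int) (k : Nat) : List Int → List Int
  | [] => pos
  | x :: xs => writeSeq (pos.set k x) (k + 1) xs

-- product g 0 * g 1 * … * g (m-1), peeled from the back (the shape of A's second loop)
def gprod (g : Int → Int) : Nat → Int
  | 0 => 1
  | m + 1 => gprod g m * g m

theorem lemA (arr : List Int) (l : List Int) (pos : List Int) (k : Nat) :
    l.foldl
      (fun st i =>
        if PySem.List.pyGetD arr i 0 = 1 then
          (PySem.List.pySetD st.1 st.2 (i + 1), st.2 + 1)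
        else st)
      (pos, (k : Int))
    = (writeSeq pos k ((l.filter (fun i => decide (PySem.List.pyGetD arr i 0 = 1))).map (· + 1)),
       ((k + (l.filter (fun i => decide (PySem.List.pyGetD arr i 0 = 1))).length : Nat) : Int)) := by
  induction l generalizing pos k with
  | nil => simp [writeSeq]
  | cons i t ih =>
    simp only [List.foldl_cons]
    by_cases h : PySem.List.pyGetD arr i 0 = 1
    · simp only [if_pos h, PySem.List.pySetD_natCast]
      have hc : (k : Int) + 1 = ((k + 1 : Nat) : Int) := by push_cast; ring
      rw [hc, ih]
      have hf : List.filter (fun i => decide (PySem.List.pyGetD arr i 0 = 1)) (i :: t)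
          = i :: List.filter (fun i => decide (PySem.List.pyGetD arr i 0 = 1)) t := by
        simp [h]
      rw [hf]
      simp only [List.map_cons, writeSeq, List.length_cons, Prod.mk.injEq]
      exact ⟨trivial, by push_cast; ring⟩
    · have hf : List.filter (fun i => decide (PySem.List.pyGetD arr i 0 = 1)) (i :: t)
          = List.filter (fun i => decide (PySem.List.pyGetD arr i 0 = 1)) t := by
        simp [h]
      simp only [if_neg h]
      rw [ih, hf]

theorem writeSeq_eq_append (xs pos : List Int) (k : Nat) (h : k + xs.length ≤ pos.length) :
    writeSeq pos k xs = pos.take k ++ xs ++ pos.drop (k + xs.length) := by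
  induction xs generalizing pos k with
  | nil => simp [writeSeq]
  | cons x xs ih =>
    simp only [List.length_cons] at h
    rw [writeSeq, ih _ _ (by simp; omega)]
    rw [List.set_eq_take_append_cons_drop, if_pos (by omega)]
    have hA : (pos.take k).length = k := by simp; omega
    have h1 : (pos.take k ++ x :: pos.drop (k+1)).take (k+1) = pos.take k ++ [x] := by
      rw [← hA, List.take_append]; simp
    have h2 : (pos.take k ++ x :: pos.drop (k+1)).drop (k+1+xs.length) = pos.drop (k+1+xs.length) := by
      rw [List.drop_append]
      have e1 : (pos.take k).drop (k+1+xs.length) = [] := by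
        apply List.drop_eq_nil_of_le; omega
      have e2 : k+1+xs.length - (pos.take k).length = xs.length + 1 := by omega
      rw [e1, e2, List.drop_succ_cons, List.drop_drop]
      simp
    rw [h1, h2]
    simp only [List.length_cons]
    have he2 : k + (xs.length + 1) = k + 1 + xs.length := by omega
    rw [he2]; simp

theorem lemFold (g : Int → Int) (m : Nat) (c : Int) :
    (PySem.List.pyRange 0 (m : Int) 1).foldl (fun w i => w * g i) c = c * gprod g m := by
  induction m with
  | zero => simp [PySem.List.pyRange_one_eq_nil (by norm_num : (0:Int) ≤ 0), gprod]
  | succ m ih =>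
    have hc : ((m + 1 : Nat) : Int) = (m : Int) + 1 := by push_cast; ring
    rw [hc, PySem.List.pyRange_one_succ_right (by positivity), List.foldl_append, ih]
    simp only [List.foldl_cons, List.foldl_nil, gprod]
    ring

theorem getD_cons_last (a : Int) (l : List Int) (d : Int) :
    (a :: l).getD ((a :: l).length - 1) d = l.getLastD a := by
  induction l generalizing a with
  | nil => simp
  | cons b t ih =>
    rw [List.getLastD_cons]
    simp only [List.length_cons, Nat.add_sub_cancel, List.getD_cons_succ]
    simpa using ih b

theorem prodGaps_snoc (ys : List Int) (a x : Int) :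
    prodGaps ((a :: ys) ++ [x]) = prodGaps (a :: ys) * (x - ys.getLastD a) := by
  induction ys generalizing a with
  | nil => simp [prodGaps]
  | cons b t ih =>
    show prodGaps (a :: b :: (t ++ [x])) = _
    have hih := ih b
    rw [List.cons_append] at hih
    simp only [prodGaps]
    rw [hih, List.getLastD_cons]
    ring

theorem lemGaps (xs rest : List Int) :
    gprod (fun i => PySem.List.pyGetD (xs ++ rest) (i + 1) 0 - PySem.List.pyGetD (xs ++ rest) i 0)
      (xs.length - 1) = prodGaps xs := by
  induction xs using List.reverseRecOn generalizing rest with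
  | nil => simp [gprod, prodGaps]
  | append_singleton ys x ih =>
    cases ys with
    | nil => simp [gprod, prodGaps]
    | cons a ys' =>
      have hassoc : (a :: ys') ++ [x] ++ rest = (a :: ys') ++ ([x] ++ rest) := by
        simp [List.append_assoc]
      have hlen : ((a :: ys') ++ [x]).length - 1 = ys'.length + 1 := by simp
      rw [hassoc, hlen, gprod]
      have hIH := ih ([x] ++ rest)
      have hlen2 : (a :: ys').length - 1 = ys'.length := by simp
      rw [hlen2] at hIH
      rw [hIH]
      have hg1 : PySem.List.pyGetD ((a :: ys') ++ ([x] ++ rest)) ((ys'.length : Int) + 1) 0 = x := by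
        have : ((ys'.length : Int) + 1) = ((ys'.length + 1 : Nat) : Int) := by push_cast; ring
        rw [this, PySem.List.pyGetD_natCast]
        rw [List.getD_eq_getElem?_getD, List.getElem?_append_right (by simp)]
        simp
      have hg2 : PySem.List.pyGetD ((a :: ys') ++ ([x] ++ rest)) ((ys'.length : Int)) 0 = ys'.getLastD a := by
        rw [PySem.List.pyGetD_natCast]
        rw [List.getD_eq_getElem?_getD, List.getElem?_append_left (by simp)]
        rw [← List.getD_eq_getElem?_getD]
        have := getD_cons_last a ys' 0
        simpa using this
      rw [hg1, hg2, prodGaps_snoc]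

theorem prodGaps_map_add_one (l : List Int) : prodGaps (l.map (· + 1)) = prodGaps l := by
  induction l with
  | nil => rfl
  | cons a rest ih =>
    cases rest with
    | nil => rfl
    | cons b t =>
      simp only [List.map_cons] at ih ⊢
      rw [prodGaps, prodGaps, ih]
      ring_nf

-- A's value, characterised through the positions of the 1s
theorem A_char (arr : List Int) (n : Int) :
    countWays arr n = if onesF arr n = [] then 0 else prodGaps (onesF arr n) := by
  simp only [countWays]
  have hA := lemA arr (PySem.List.pyRange 0 n 1)
    ((PySem.List.pyRange 0 n 1).map (fun _ => (0 : Int))) 0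
  push_cast at hA
  rw [hA]
  have hbeq : (fun i => decide (PySem.List.pyGetD arr i 0 = 1)) = bP arr := rfl
  rw [hbeq]
  set ones := (PySem.List.pyRange 0 n 1).filter (bP arr) with hones
  have honesF : onesF arr n = ones := rfl
  rw [honesF]
  simp only [zero_add]
  set hits := ones.map (· + 1) with hhits
  set pos0 := (PySem.List.pyRange 0 n 1).map (fun _ => (0 : Int)) with hpos0
  have hle : 0 + hits.length ≤ pos0.length := by
    rw [hhits, hpos0, List.length_map, List.length_map, Nat.zero_add, hones]
    exact List.length_filter_le _ _
  have hw := writeSeq_eq_append hits pos0 0 hle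
  simp only [List.take_zero, Nat.zero_add, List.nil_append] at hw
  by_cases hone : ones = []
  · rw [if_pos hone]
    have hh : hits = [] := by simp [hhits, hone]
    simp [hone]
  · have hlen1 : 0 < ones.length := List.length_pos_of_ne_nil hone
    rw [if_neg hone, if_neg (by simpa using hone), hw]
    have hlh : hits.length = ones.length := by rw [hhits]; exact List.length_map ..
    have hcast : (ones.length:Int) - 1 = ((hits.length - 1 : Nat) : Int) := by
      rw [hlh]; omega
    rw [hcast]
    rw [lemFold (fun i => PySem.List.pyGetD (hits ++ List.drop hits.length pos0) (i+1) 0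
          - PySem.List.pyGetD (hits ++ List.drop hits.length pos0) i 0) (hits.length - 1) 1]
    rw [lemGaps hits (List.drop hits.length pos0)]
    simp [hhits, prodGaps_map_add_one]

-- ---------- B-side lemmas ----------

theorem cnt_self (arr : List Int) (i : Int) : cntF arr i i = 0 := by
  simp [cntF, PySem.List.pyRange_one_eq_nil (le_refl i)]

theorem cnt_cons (arr : List Int) {a i : Int} (h : a < i) :
    cntF arr a i = (if bP arr a then 1 else 0) + cntF arr (a + 1) i := by
  simp only [cntF, PySem.List.pyRange_one_cons h, List.filter_cons]
  by_cases hb : bP arr a = true <;> simp [hb] <;> ring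

theorem cnt_snoc (arr : List Int) {t m : Int} (h : t ≤ m) :
    cntF arr t (m + 1) = cntF arr t m + (if bP arr m then 1 else 0) := by
  simp only [cntF, PySem.List.pyRange_one_succ_right h, List.filter_append, List.length_append]
  by_cases hb : bP arr m = true <;> simp [hb]

theorem ones_split (arr : List Int) {t i : Int} (h1 : 0 ≤ t) (h2 : t ≤ i) :
    onesF arr i = onesF arr t ++ (PySem.List.pyRange t i 1).filter (bP arr) := by
  simp only [onesF]
  rw [PySem.List.pyRange_one_append 0 t i h1 h2, List.filter_append]

theorem cnt_eq_zero_iff (arr : List Int) (t i : Int) :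
    cntF arr t i = 0 ↔ ∀ s, t ≤ s → s < i → bP arr s = false := by
  simp only [cntF, Nat.cast_eq_zero, List.length_eq_zero_iff, List.filter_eq_nil_iff,
    PySem.List.mem_pyRange_one]
  constructor
  · intro h s h1 h2; by_cases hb : bP arr s = true
    · exact absurd hb (h s ⟨h1, h2⟩)
    · simpa using hb
  · intro h s hs hb; rw [h s hs.1 hs.2] at hb; simp at hb

theorem ones_eq_of_cnt_zero (arr : List Int) {t i : Int} (h1 : 0 ≤ t) (h2 : t ≤ i)
    (h : cntF arr t i = 0) : onesF arr t = onesF arr i := by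
  rw [ones_split arr h1 h2]
  have : (PySem.List.pyRange t i 1).filter (bP arr) = [] := by
    simp only [cntF, Nat.cast_eq_zero, List.length_eq_zero_iff] at h; exact h
  simp [this]

theorem mem_onesF (arr : List Int) (i s : Int) :
    s ∈ onesF arr i ↔ (0 ≤ s ∧ s < i ∧ bP arr s = true) := by
  simp only [onesF, List.mem_filter, PySem.List.mem_pyRange_one]
  tauto

theorem cnt_ne_zero (arr : List Int) {t q i : Int} (h1 : t ≤ q) (h2 : q < i)
    (hb : bP arr q = true) : cntF arr t i ≠ 0 := by
  intro h
  rw [cnt_eq_zero_iff] at h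
  have := h q h1 h2
  rw [hb] at this; simp at this

theorem pairwise_onesF (arr : List Int) (i : Int) : (onesF arr i).Pairwise (· < ·) :=
  (PySem.List.pairwise_lt_pyRange_one 0 i).sublist List.filter_sublist

theorem le_getLast_of_pairwise {l : List Int} (hp : l.Pairwise (· < ·)) (h : l ≠ [])
    (x : Int) (hx : x ∈ l) : x ≤ l.getLast h := by
  induction l with
  | nil => simp at hx
  | cons a t ih =>
    cases t with
    | nil => simp at hx; simp [hx, List.getLast]
    | cons b u =>
      rcases List.mem_cons.mp hx with hxa | hx
      · rw [List.getLast_cons (by simp), hxa]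
        exact le_of_lt (List.rel_of_pairwise_cons hp (List.getLast_mem (by simp)))
      · rw [List.getLast_cons (by simp)]
        exact ih (List.Pairwise.of_cons hp) (by simp) hx


theorem getLast_eq_of_eq_cons {l : List Int} (h : l ≠ []) {a : Int} {ys : List Int}
    (he : l = a :: ys) : l.getLast h = ys.getLastD a := by
  subst he; exact List.getLast_eq_getLastD _

theorem ones_nonpos (arr : List Int) {n : Int} (h : n ≤ 0) : onesF arr n = [] := by
  simp [onesF, PySem.List.pyRange_one_eq_nil h]

theorem ones_snoc (arr : List Int) {m : Int} (h : 0 ≤ m) :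
    onesF arr (m + 1) = onesF arr m ++ (if bP arr m = true then [m] else []) := by
  simp only [onesF, PySem.List.pyRange_one_succ_right h, List.filter_append]
  by_cases hb : bP arr m = true <;> simp [hb]

-- core: the DP sum over all segment starts equals the product of gaps
theorem core_sum (arr : List Int) (m : Nat) (hm : 1 ≤ m) :
    ((PySem.List.pyRange 0 (m : Int) 1).map
      (fun t => if cntF arr t (m : Int) = 1 then fDP arr t else 0)).sum = fDP arr (m : Int) := by
  induction m, hm using Nat.le_induction with
  | base =>
    have hr : PySem.List.pyRange 0 (1 : Int) 1 = [0] := by decide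
    have ho : onesF arr 1 = (if bP arr 0 = true then [(0:Int)] else []) := by
      have := ones_snoc arr (le_refl (0:Int))
      rw [zero_add] at this
      rw [this, ones_nonpos arr (le_refl (0:Int)), List.nil_append]
    have hc : cntF arr 0 1 = (if bP arr 0 = true then 1 else 0) := by
      simp only [cntF, hr, List.filter_cons, List.filter_nil]
      by_cases hb : bP arr 0 = true <;> simp [hb]
    by_cases hb : bP arr 0 = true
    · simp [hr, hc, hb, fDP, ho, ones_nonpos arr (le_refl (0:Int)), prodGaps]
    · simp [hr, hc, hb, fDP, ho]
  | succ m hm ih =>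
    have hm0 : (0:Int) ≤ (m:Int) := by positivity
    have hcast : ((m + 1 : Nat) : Int) = (m : Int) + 1 := by push_cast; ring
    rw [hcast, PySem.List.pyRange_one_succ_right hm0, List.map_append, List.sum_append]
    simp only [List.map_singleton, List.sum_singleton]
    have hlast : cntF arr (m:Int) ((m:Int)+1) = (if bP arr (m:Int) = true then 1 else 0) := by
      rw [cnt_snoc arr (le_refl (m:Int)), cnt_self]; ring
    by_cases hbm : bP arr (m:Int) = true
    · -- arr[m] == 1
      rw [if_pos hbm] at hlast
      have hones : onesF arr ((m:Int)+1) = onesF arr (m:Int) ++ [(m:Int)] := by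
        rw [ones_snoc arr hm0, if_pos hbm]
      by_cases h0 : onesF arr (m:Int) = []
      · -- no earlier 1: every prefix count is 0, only dp[0]=1 contributes
        have hterm : ∀ t ∈ PySem.List.pyRange 0 (m:Int) 1,
            (if cntF arr t ((m:Int)+1) = 1 then fDP arr t else 0)
              = (if t = 0 then 1 else 0) := by
          intro t ht
          rw [PySem.List.mem_pyRange_one] at ht
          have hz : cntF arr t (m:Int) = 0 := by
            rw [cnt_eq_zero_iff]
            intro s h1 h2
            by_contra hbs
            have hbs' : bP arr s = true := by simpa using hbs
            have : s ∈ onesF arr (m:Int) := (mem_onesF arr _ s).mpr ⟨le_trans ht.1 h1, h2, hbs'⟩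
            simp [h0] at this
          have hc1 : cntF arr t ((m:Int)+1) = 1 := by
            rw [cnt_snoc arr (le_of_lt ht.2), hz, if_pos hbm]; norm_num
          rw [if_pos hc1]
          have : onesF arr t = [] := by
            rw [ones_eq_of_cnt_zero arr ht.1 (le_of_lt ht.2) hz]; exact h0
          simp [fDP, this]
        rw [List.map_congr_left hterm]
        have hmpos : (0:Int) < (m:Int) := by exact_mod_cast hm
        rw [PySem.List.pyRange_one_cons hmpos, List.map_cons, List.sum_cons, if_pos rfl]
        have htail : ((PySem.List.pyRange (0+1) (m:Int) 1).map
            (fun t => if t = 0 then (1:Int) else 0)).sum = 0 := by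
          apply List.sum_eq_zero
          intro x hx
          rw [List.mem_map] at hx
          obtain ⟨t, ht, rfl⟩ := hx
          rw [PySem.List.mem_pyRange_one] at ht
          rw [if_neg (by omega)]
        rw [htail, if_pos hlast]
        have hfm : fDP arr (m:Int) = 0 := by
          simp [fDP, h0]
          omega
        rw [hfm]
        simp [fDP, hones, h0, prodGaps]
      · -- q = last earlier 1
        set q := (onesF arr (m:Int)).getLast h0 with hq
        have hqmem : q ∈ onesF arr (m:Int) := List.getLast_mem h0
        obtain ⟨hq0, hqm, hbq⟩ := (mem_onesF arr _ q).mp hqmem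
        set G := prodGaps (onesF arr (m:Int)) with hG
        have hterm : ∀ t ∈ PySem.List.pyRange 0 (m:Int) 1,
            (if cntF arr t ((m:Int)+1) = 1 then fDP arr t else 0)
              = (if q < t then G else 0) := by
          intro t ht
          rw [PySem.List.mem_pyRange_one] at ht
          rw [cnt_snoc arr (le_of_lt ht.2), if_pos hbm]
          by_cases hqt : q < t
          · have hz : cntF arr t (m:Int) = 0 := by
              rw [cnt_eq_zero_iff]
              intro s h1 h2
              by_contra hbs
              have hbs' : bP arr s = true := by simpa using hbs
              have hsmem : s ∈ onesF arr (m:Int) := (mem_onesF arr _ s).mpr ⟨le_trans ht.1 h1, h2, hbs'⟩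
              have := le_getLast_of_pairwise (pairwise_onesF arr (m:Int)) h0 s hsmem
              rw [← hq] at this
              omega
            rw [hz, if_pos (by norm_num), if_pos hqt]
            rw [fDP, ones_eq_of_cnt_zero arr ht.1 (le_of_lt ht.2) hz, if_neg h0, hG]
          · have hnz : cntF arr t (m:Int) ≠ 0 := cnt_ne_zero arr (by omega) hqm hbq
            have hnn : (0:Int) ≤ cntF arr t (m:Int) := by
              simp [cntF]
            rw [if_neg (by omega), if_neg hqt]
        rw [List.map_congr_left hterm]
        rw [PySem.List.pyRange_one_append 0 (q+1) (m:Int) (by omega) (by omega),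
          List.map_append, List.sum_append]
        have hz1 : ((PySem.List.pyRange 0 (q+1) 1).map (fun t => if q < t then G else 0)).sum = 0 := by
          apply List.sum_eq_zero
          intro x hx
          rw [List.mem_map] at hx
          obtain ⟨t, ht, rfl⟩ := hx
          rw [PySem.List.mem_pyRange_one] at ht
          rw [if_neg (by omega)]
        have hz2 : ((PySem.List.pyRange (q+1) (m:Int) 1).map (fun t => if q < t then G else 0))
            = (PySem.List.pyRange (q+1) (m:Int) 1).map (fun _ => G) := by
          apply List.map_congr_left
          intro t ht
          rw [PySem.List.mem_pyRange_one] at ht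
          rw [if_pos (by omega)]
        rw [hz1, hz2, PySem.List.sum_map_const_int, PySem.List.length_pyRange_one]
        rw [if_pos hlast]
        have hfm : fDP arr (m:Int) = G := by rw [fDP, if_neg h0, hG]
        rw [hfm]
        have hfm1 : fDP arr ((m:Int)+1) = G * ((m:Int) - q) := by
          rw [fDP, hones]
          obtain ⟨a, ys, hex⟩ : ∃ a ys, onesF arr (m:Int) = a :: ys := by
            cases h' : onesF arr (m:Int) with
            | nil => exact absurd h' h0
            | cons a ys => exact ⟨a, ys, rfl⟩
          rw [hex, if_neg (by simp), prodGaps_snoc]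
          have hql : ys.getLastD a = q := by
            rw [hq, getLast_eq_of_eq_cons h0 hex]
          rw [hql, hG, hex]
        rw [hfm1]
        have : (((m:Int) - (q+1)).toNat : Int) = (m:Int) - q - 1 := by omega
        rw [this]
        ring
    · -- arr[m] != 1: nothing changes
      rw [if_neg hbm] at hlast
      have hterm : ∀ t ∈ PySem.List.pyRange 0 (m:Int) 1,
          (if cntF arr t ((m:Int)+1) = 1 then fDP arr t else 0)
            = (if cntF arr t (m:Int) = 1 then fDP arr t else 0) := by
        intro t ht
        rw [PySem.List.mem_pyRange_one] at ht
        rw [cnt_snoc arr (le_of_lt ht.2), if_neg hbm, add_zero]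
      rw [List.map_congr_left hterm, ih, if_neg (by rw [hlast]; norm_num)]
      have hones : onesF arr ((m:Int)+1) = onesF arr (m:Int) := by
        rw [ones_snoc arr hm0, if_neg hbm, List.append_nil]
      rw [add_zero, fDP, fDP, hones]
      split_ifs <;> first | rfl | omega

theorem inner_fold (arr dp : List Int) (i : Int) (k : Nat) :
    ∀ (a T c : Int), 1 ≤ a → a + k = i + 1 → c = cntF arr (a - 1) i →
    (PySem.List.pyRange a (i + 1) 1).foldl
      (fun st j =>
        (if PySem.List.pyGetD arr (j - 1) 0 = 1 then st.1 - 1 else st.1,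
         if st.1 = 1 then st.2 + PySem.List.pyGetD dp (j - 1) 0 else st.2))
      (c, T)
    = (0, T + ((PySem.List.pyRange (a - 1) i 1).map
        (fun t => if cntF arr t i = 1 then PySem.List.pyGetD dp t 0 else 0)).sum) := by
  induction k with
  | zero =>
    intro a T c h1 h2 h3
    have ha : a = i + 1 := by omega
    subst ha
    have he : i + 1 - 1 = i := by ring
    rw [he] at h3 ⊢
    rw [h3, cnt_self, PySem.List.pyRange_one_eq_nil (le_refl (i+1)),
      PySem.List.pyRange_one_eq_nil (le_refl i)]
    simp
  | succ k ih =>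
    intro a T c h1 h2 h3
    have hai : a < i + 1 := by omega
    have ha1i : a - 1 < i := by omega
    rw [PySem.List.pyRange_one_cons hai]
    simp only [List.foldl_cons]
    have ha1 : a - 1 + 1 = a := by ring
    have hsplit : c = (if bP arr (a - 1) = true then 1 else 0) + cntF arr a i := by
      rw [h3, cnt_cons arr ha1i, ha1]
    have hfst : (if PySem.List.pyGetD arr (a - 1) 0 = 1 then c - 1 else c) = cntF arr a i := by
      by_cases hb : PySem.List.pyGetD arr (a - 1) 0 = 1
      · have hb' : bP arr (a - 1) = true := by simp [bP, hb]
        rw [if_pos hb, hsplit, hb']; simp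
      · have hb' : bP arr (a - 1) = false := by simp [bP, hb]
        rw [if_neg hb, hsplit, hb']; simp
    have hsnd : (if c = 1 then T + PySem.List.pyGetD dp (a - 1) 0 else T)
        = T + (if cntF arr (a - 1) i = 1 then PySem.List.pyGetD dp (a - 1) 0 else 0) := by
      rw [h3]
      by_cases hc : cntF arr (a - 1) i = 1 <;> simp [hc]
    rw [hfst, hsnd]
    rw [ih (a + 1) (T + (if cntF arr (a - 1) i = 1 then PySem.List.pyGetD dp (a - 1) 0 else 0))
      (cntF arr a i) (by omega) (by omega) (by rw [show a + 1 - 1 = a by ring])]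
    rw [show a + 1 - 1 = a by ring]
    rw [PySem.List.pyRange_one_cons ha1i, List.map_cons, List.sum_cons, ha1]
    rw [add_assoc]

theorem count_take (arr : List Int) (m : Nat) (hm : m ≤ arr.length) :
    ((PySem.List.count (arr.take m) 1 : Nat) : Int) = cntF arr 0 (m : Int) := by
  induction m with
  | zero =>
    simp [PySem.List.count_eq, cnt_self]
  | succ m ih =>
    have hmlt : m < arr.length := by omega
    have ihm := ih (by omega)
    rw [List.take_succ_eq_append_getElem hmlt]
    rw [PySem.List.count_eq, List.count_append, ← PySem.List.count_eq]
    have hc : ((m + 1 : Nat) : Int) = (m : Int) + 1 := by push_cast; ring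
    rw [hc, cnt_snoc arr (by positivity), ← ihm]
    have hb : bP arr (m : Int) = decide (arr[m] = 1) := by
      simp [bP, PySem.List.pyGetD_natCast, List.getD_eq_getElem?_getD, List.getElem?_eq_getElem hmlt]
    rw [hb]
    by_cases h1 : arr[m] = (1:Int)
    · simp [h1, PySem.List.count_eq]
    · simp [h1, PySem.List.count_eq]

theorem mem_take_iff (arr : List Int) (m : Nat) (hm : m ≤ arr.length) :
    (1 : Int) ∈ arr.take m ↔ onesF arr (m : Int) ≠ [] := by
  rw [← List.count_pos_iff]
  have h1 : ((PySem.List.count (arr.take m) 1 : Nat) : Int) = cntF arr 0 (m : Int) :=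
    count_take arr m hm
  rw [PySem.List.count_eq] at h1
  have h2 : cntF arr 0 (m : Int) = ((onesF arr (m : Int)).length : Int) := rfl
  constructor
  · intro h hnil
    rw [hnil] at h2
    simp at h2
    omega
  · intro h
    have : (onesF arr (m : Int)).length ≠ 0 := fun hz => h (List.eq_nil_of_length_eq_zero hz)
    omega

theorem outer_fold (arr : List Int) (m : Nat) (hm : (m : Int) ≤ (arr.length : Int)) :
    (PySem.List.pyRange 1 ((m : Int) + 1) 1).foldl
      (fun dp i =>
        let st : Int × Int :=
          (PySem.List.pyRange 1 (i + 1) 1).foldl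
            (fun st j =>
              (if PySem.List.pyGetD arr (j - 1) 0 = 1 then st.1 - 1 else st.1,
               if st.1 = 1 then st.2 + PySem.List.pyGetD dp (j - 1) 0 else st.2))
            (((PySem.List.count (PySem.List.slice arr none (some i)) 1 : Nat) : Int), 0)
        dp ++ [st.2])
      [1]
    = (PySem.List.pyRange 0 ((m : Int) + 1) 1).map (fDP arr) := by
  induction m with
  | zero =>
    simp only [Nat.cast_zero]
    rw [PySem.List.pyRange_one_eq_nil (by norm_num : (0:Int) + 1 ≤ 1)]
    simp only [List.foldl_nil]
    rw [PySem.List.pyRange_one_singleton]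
    simp [fDP, ones_nonpos arr (le_refl (0:Int))]
  | succ m ih =>
    have ihm := ih (by push_cast at hm ⊢; omega)
    have hc : ((m + 1 : Nat) : Int) = (m : Int) + 1 := by push_cast; ring
    rw [hc, PySem.List.pyRange_one_succ_right (by omega : (1:Int) ≤ (m:Int) + 1),
      List.foldl_append, ihm]
    simp only [List.foldl_cons, List.foldl_nil]
    have hslice : PySem.List.slice arr none (some ((m:Int) + 1)) = arr.take (m + 1) := by
      rw [← hc, PySem.List.slice_to_natCast]
    have hcnt : (((PySem.List.count (PySem.List.slice arr none (some ((m:Int)+1))) 1 : Nat) : Int))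
        = cntF arr 0 ((m:Int) + 1) := by
      rw [hslice, count_take arr (m+1) (by omega), hc]
    have hinner := inner_fold arr ((PySem.List.pyRange 0 ((m:Int) + 1) 1).map (fDP arr))
      ((m:Int) + 1) (m + 1) 1 0 (cntF arr 0 ((m:Int) + 1)) (le_refl 1) (by push_cast; ring)
      (by rw [show (1:Int) - 1 = 0 by ring])
    rw [show (1:Int) - 1 = 0 by ring] at hinner
    rw [hcnt, hinner]
    have hcongr : ((PySem.List.pyRange 0 ((m:Int)+1) 1).map
        (fun t => if cntF arr t ((m:Int)+1) = 1
          then PySem.List.pyGetD ((PySem.List.pyRange 0 ((m:Int) + 1) 1).map (fDP arr)) t 0 else 0))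
        = ((PySem.List.pyRange 0 ((m:Int)+1) 1).map
        (fun t => if cntF arr t ((m:Int)+1) = 1 then fDP arr t else 0)) := by
      apply List.map_congr_left
      intro t ht
      rw [PySem.List.mem_pyRange_one] at ht
      rw [PySem.List.pyGetD_map_pyRange_of_nonneg (fDP arr) ((m:Int)+1) t 0 ht.1 ht.2]
    rw [hcongr]
    have hcore := core_sum arr (m + 1) (by omega)
    rw [hc] at hcore
    rw [hcore, zero_add]
    rw [PySem.List.pyRange_one_succ_right (by omega : (0:Int) ≤ (m:Int) + 1), List.map_append]
    rfl

theorem B_char (arr : List Int) (n : Int) (hn : n ≤ (arr.length : Int)) :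
    countWays_alt arr n = if onesF arr n = [] then 0 else prodGaps (onesF arr n) := by
  simp only [countWays_alt]
  by_cases hg : n ≤ 0 ∨ (1 : Int) ∉ PySem.List.slice arr none (some n)
  · rw [if_pos hg]
    rcases hg with hle | hmem
    · rw [if_pos (ones_nonpos arr hle)]
    · by_cases hle : n ≤ 0
      · rw [if_pos (ones_nonpos arr hle)]
      · push_neg at hle
        have hnn : n = ((n.toNat : Nat) : Int) := by omega
        have h1 : PySem.List.slice arr none (some n) = arr.take n.toNat := by
          rw [PySem.List.slice_to arr (by omega : (0:Int) ≤ n)]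
        rw [h1] at hmem
        have hones : onesF arr n = [] := by
          by_contra hne
          apply hmem
          apply (mem_take_iff arr n.toNat (by omega)).mpr
          rw [← hnn]; exact hne
        rw [if_pos hones]
  · rw [if_neg hg]
    push_neg at hg
    obtain ⟨hpos, hmem⟩ := hg
    have hnn : ((n.toNat : Nat) : Int) = n := by omega
    have houter := outer_fold arr n.toNat (by omega)
    rw [hnn] at houter
    rw [houter]
    rw [PySem.List.pyGetD_map_pyRange_of_nonneg (fDP arr) (n + 1) n 0 (by omega) (by omega)]
    have hones : onesF arr n ≠ [] := by
      have h1 : PySem.List.slice arr none (some n) = arr.take n.toNat := by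
        rw [PySem.List.slice_to arr (by omega : (0:Int) ≤ n)]
      rw [h1] at hmem
      have := (mem_take_iff arr n.toNat (by omega)).mp hmem
      rw [hnn] at this; exact this
    rw [if_neg hones, fDP, if_neg hones]

-- ===== VERDICT (by name: the statement is the Claim_ definition above) =====
theorem countWays_spec : Claim_equal_countWays := by
  intro arr n _ hpre
  show countWays arr n = countWays_alt arr n
  rw [A_char, B_char arr n hpre]
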